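-- pv_equiv track=rewrite | github.com/leifer98/ATM | ex5_tester.py | generate_quot_arith_series
-- ===== SOURCE A (Python) =====
-- def generate_quot_arith_series(first_term, initial_quotient, common_difference, num_terms):
--     # Initialize the series list with the first term
--     series = [first_term]
--
--     # Initialize the first quotient
--     current_quotient = initial_quotient
--
--     for i in range(1, num_terms):
--         # Calculate the next term in the series
--         next_term = series[-1] * current_quotient
--         # Append the next term to the series
--         series.append(next_term)
--         # Update the quotient for the next iteration
--         current_quotient += common_difference
--
--     return series
-- ===== SOURCE B (Python) =====
-- def generate_quot_arith_series(first_term, initial_quotient, common_difference, num_terms):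
--     # A zero quotient makes every later term zero, and its index is computable in
--     # closed form from the arithmetic progression: solve q0 + j*d == 0 with divmod.
--     # Fold only through the quotients before it, then pad with zeros.
--     count = num_terms if num_terms > 1 else 1
--     if common_difference == 0:
--         stop = 0 if initial_quotient == 0 else count - 1
--     else:
--         j, r = divmod(-initial_quotient, common_difference)
--         stop = j if (r == 0 and 0 <= j < count - 1) else count - 1
--     series = [first_term]
--     t = first_term
--     for j in range(stop):
--         t *= initial_quotient + j * common_difference
--         series.append(t)
--     series.extend([0] * (count - 1 - stop))
--     return series
-- ===== Notes on version B (the rewrite author's own statement) =====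
-- stated objective: alternative
-- what changed: Instead of blindly multiplying through all quotients, B solves q0 + j*d == 0 in closed form with divmod to find the (unique) zero quotient, folds the first term only through the quotients before it with an accumulator, and pads the rest of the series with literal zeros, doing no multiplications past the zero.
import Mathlib
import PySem

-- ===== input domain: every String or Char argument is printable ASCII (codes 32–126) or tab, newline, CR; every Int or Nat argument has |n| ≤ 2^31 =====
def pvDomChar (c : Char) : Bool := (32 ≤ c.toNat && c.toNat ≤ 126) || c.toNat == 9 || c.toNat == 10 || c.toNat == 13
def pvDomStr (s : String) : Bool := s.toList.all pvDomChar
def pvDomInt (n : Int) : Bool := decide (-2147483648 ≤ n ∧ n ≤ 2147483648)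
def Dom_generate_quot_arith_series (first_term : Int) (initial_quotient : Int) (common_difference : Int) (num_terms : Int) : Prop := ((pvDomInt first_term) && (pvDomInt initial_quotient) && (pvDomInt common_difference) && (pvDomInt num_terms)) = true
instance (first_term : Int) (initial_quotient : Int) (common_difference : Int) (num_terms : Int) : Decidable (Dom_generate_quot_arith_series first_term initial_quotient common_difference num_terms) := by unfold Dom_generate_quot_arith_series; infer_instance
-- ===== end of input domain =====

-- B finds the zero quotient in closed form with divmod, folds only through the quotients
-- before it, and pads the tail of the series with zeros (alternative algorithm).

-- ===== PORT A =====
-- series[-1] always exists (series starts nonempty), so the IndexError branch is unreachable;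
-- `.getD 0` only totalises it.
def generate_quot_arith_series (first_term : Int) (initial_quotient : Int) (common_difference : Int) (num_terms : Int) : List Int :=
  let st := (PySem.List.pyRange 1 num_terms 1).foldl
    (fun (s : List Int × Int) _ =>
      (s.1 ++ [((PySem.List.pyGet? s.1 (-1)).getD 0) * s.2], s.2 + common_difference))
    ([first_term], initial_quotient)
  st.1

-- ===== PORT B =====
def generate_quot_arith_series_alt (first_term : Int) (initial_quotient : Int) (common_difference : Int) (num_terms : Int) : List Int :=
  let count : Int := if num_terms > 1 then num_terms else 1
  let stop : Int :=
    if common_difference = 0 then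
      (if initial_quotient = 0 then 0 else count - 1)
    else
      -- j, r = divmod(-initial_quotient, common_difference)
      let j := PySem.Int.floordiv (-initial_quotient) common_difference
      let r := PySem.Int.mod (-initial_quotient) common_difference
      if r = 0 ∧ 0 ≤ j ∧ j < count - 1 then j else count - 1
  let st := (List.range stop.toNat).foldl
    (fun (s : List Int × Int) (j : Nat) =>
      let t := s.2 * (initial_quotient + (j : Int) * common_difference)
      (s.1 ++ [t], t))
    ([first_term], first_term)
  st.1 ++ List.replicate (count - 1 - stop).toNat 0

-- ===== PRECONDITION & SPEC =====
def Spec_generate_quot_arith_series (first_term : Int) (initial_quotient : Int) (common_difference : Int) (num_terms : Int) (out : List Int) : Prop := out = generate_quot_arith_series_alt first_term initial_quotient common_difference num_terms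
instance (first_term : Int) (initial_quotient : Int) (common_difference : Int) (num_terms : Int) (out : List Int) : Decidable (Spec_generate_quot_arith_series first_term initial_quotient common_difference num_terms out) := by unfold Spec_generate_quot_arith_series; infer_instance

-- ===== CLAIM (what is proved, stated in full; the proofs are below) =====
def Claim_equal_generate_quot_arith_series : Prop := ∀ (first_term : Int) (initial_quotient : Int) (common_difference : Int) (num_terms : Int), Dom_generate_quot_arith_series first_term initial_quotient common_difference num_terms → Spec_generate_quot_arith_series first_term initial_quotient common_difference num_terms (generate_quot_arith_series first_term initial_quotient common_difference num_terms)

-- ===== LEMMAS AND PROOFS =====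

-- product of the first k quotients
def pvQuotProd (q0 d : Int) (k : Nat) : Int :=
  (List.range k).foldl (fun p j => p * (q0 + (j : Int) * d)) 1

-- the first m+1 terms of the series, each in closed form
def pvSeries (f q0 d : Int) (m : Nat) : List Int :=
  (List.range (m + 1)).map (fun i => f * pvQuotProd q0 d i)

lemma pvQuotProd_succ (q0 d : Int) (m : Nat) :
    pvQuotProd q0 d (m + 1) = pvQuotProd q0 d m * (q0 + (m : Int) * d) := by
  simp [pvQuotProd, List.range_succ]

lemma pvSeries_split (f q0 d : Int) (m : Nat) :
    pvSeries f q0 d m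
      = (List.range m).map (fun i => f * pvQuotProd q0 d i) ++ [f * pvQuotProd q0 d m] := by
  simp [pvSeries, List.range_succ]

-- A's loop invariant: folding the step over any list of length k, starting from the
-- series of the first m+1 terms and quotient q0 + m*d, yields the first m+k+1 terms.
lemma loopA (f q0 d : Int) (l : List Int) : ∀ (m : Nat),
    (l.foldl
        (fun (s : List Int × Int) _ =>
          (s.1 ++ [((PySem.List.pyGet? s.1 (-1)).getD 0) * s.2], s.2 + d))
        (pvSeries f q0 d m, q0 + (m : Int) * d))
      = (pvSeries f q0 d (m + l.length), q0 + ((m + l.length : Nat) : Int) * d) := by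
  induction l with
  | nil => intro m; simp
  | cons x xs ih =>
    intro m
    simp only [List.foldl_cons]
    rw [pvSeries_split, PySem.List.pyGet?_neg_one_append_singleton]
    have hstep : (List.range m).map (fun i => f * pvQuotProd q0 d i)
        ++ [f * pvQuotProd q0 d m] ++ [f * pvQuotProd q0 d m * (q0 + (m : Int) * d)]
        = pvSeries f q0 d (m + 1) := by
      rw [pvSeries_split f q0 d (m + 1), pvQuotProd_succ]
      simp [List.range_succ, mul_assoc, List.append_assoc]
    have hq : q0 + (m : Int) * d + d = q0 + ((m + 1 : Nat) : Int) * d := by push_cast; ring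
    simp only [Option.getD_some, hstep, hq]
    rw [ih (m + 1)]
    simp only [List.length_cons]
    have hL : m + 1 + xs.length = m + (xs.length + 1) := by omega
    rw [hL]

-- B's loop invariant: the accumulator fold over range k builds the first k+1 terms
lemma loopB (f q0 d : Int) (k : Nat) :
    ((List.range k).foldl
        (fun (s : List Int × Int) (j : Nat) =>
          ((s.1 ++ [s.2 * (q0 + (j : Int) * d)]), s.2 * (q0 + (j : Int) * d)))
        ([f], f))
      = (pvSeries f q0 d k, f * pvQuotProd q0 d k) := by
  induction k with
  | zero => simp [pvSeries, pvQuotProd]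
  | succ m ih =>
    rw [List.range_succ, List.foldl_append, ih]
    simp only [List.foldl_cons, List.foldl_nil]
    rw [pvSeries_split f q0 d (m + 1), pvQuotProd_succ, pvSeries_split f q0 d m]
    simp [List.range_succ, mul_assoc, List.append_assoc]

lemma pvQuotProd_eq_prod (q0 d : Int) (k : Nat) :
    pvQuotProd q0 d k = ((List.range k).map (fun (j : Nat) => q0 + (j : Int) * d)).prod := by
  induction k with
  | zero => simp [pvQuotProd]
  | succ m ih =>
    rw [pvQuotProd_succ, List.range_succ, List.map_append, List.prod_append, ← ih]
    simp

-- once some quotient before index k is zero, the product of the first k quotients is zero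
lemma pvQuotProd_eq_zero (q0 d : Int) (s k : Nat) (hz : q0 + (s : Int) * d = 0)
    (hsk : s < k) : pvQuotProd q0 d k = 0 := by
  rw [pvQuotProd_eq_prod]
  have hm : q0 + (s : Int) * d ∈ (List.range k).map (fun (j : Nat) => q0 + (j : Int) * d) :=
    List.mem_map_of_mem (f := fun j : Nat => q0 + (j : Int) * d) (List.mem_range.mpr hsk)
  rw [hz] at hm
  exact List.prod_eq_zero hm

-- padding: past a zero quotient at index s the closed-form series is all zeros
lemma pvSeries_pad (f q0 d : Int) (s N : Nat) (hsN : s ≤ N)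
    (hz : s < N → q0 + (s : Int) * d = 0) :
    pvSeries f q0 d N = pvSeries f q0 d s ++ List.replicate (N - s) 0 := by
  rcases Nat.eq_or_lt_of_le hsN with h | h
  · subst h; simp
  · have hcount : N + 1 = (s + 1) + (N - s) := by omega
    unfold pvSeries
    rw [hcount, List.range_add, List.map_append, List.map_map]
    congr 1
    rw [List.eq_replicate_iff]
    refine ⟨by simp, ?_⟩
    intro x hx
    rcases List.mem_map.mp hx with ⟨i, _, rfl⟩
    simp only [Function.comp_apply]
    rw [pvQuotProd_eq_zero q0 d s (s + 1 + i) (hz h) (by omega), mul_zero]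

-- bridge: B's fold-then-pad equals the closed-form series of length (count-1)+1,
-- for any stop with 0 ≤ stop ≤ count-1 whose quotient is zero when stop < count-1
lemma altB (f q0 d count stop : Int) (h0 : 0 ≤ stop) (h1 : stop ≤ count - 1)
    (hz : stop < count - 1 → q0 + stop * d = 0) :
    (((List.range stop.toNat).foldl
        (fun (s : List Int × Int) (j : Nat) =>
          ((s.1 ++ [s.2 * (q0 + (j : Int) * d)]), s.2 * (q0 + (j : Int) * d)))
        ([f], f)).1 ++ List.replicate (count - 1 - stop).toNat 0)
      = pvSeries f q0 d (count - 1).toNat := by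
  rw [loopB]
  have hrep : (count - 1 - stop).toNat = (count - 1).toNat - stop.toNat := by omega
  rw [hrep]
  refine (pvSeries_pad f q0 d stop.toNat (count - 1).toNat (by omega) ?_).symm
  intro hlt
  have : stop < count - 1 := by omega
  have := hz this
  rwa [Int.toNat_of_nonneg h0]

-- ===== VERDICT (by name: the statement is the Claim_ definition above) =====
theorem generate_quot_arith_series_spec : Claim_equal_generate_quot_arith_series := by
  intro f q0 d n _
  unfold Spec_generate_quot_arith_series generate_quot_arith_series generate_quot_arith_series_alt
  -- left side: A computes the closed-form series of the first (n-1).toNat + 1 terms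
  have h0 : pvSeries f q0 d 0 = [f] := by simp [pvSeries, pvQuotProd]
  have hq0 : q0 + ((0 : Nat) : Int) * d = q0 := by simp
  have hA := loopA f q0 d (PySem.List.pyRange 1 n 1) 0
  rw [h0, hq0] at hA
  simp only [Nat.zero_add] at hA
  simp only [hA, PySem.List.length_pyRange_one]
  -- right side: B's fold-then-pad equals the same series
  set c : Int := if n > 1 then n else 1 with hc
  set s : Int :=
    if d = 0 then (if q0 = 0 then 0 else c - 1)
    else
      if PySem.Int.mod (-q0) d = 0 ∧ 0 ≤ PySem.Int.floordiv (-q0) d ∧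
          PySem.Int.floordiv (-q0) d < c - 1
        then PySem.Int.floordiv (-q0) d else c - 1
    with hs
  have hc1 : 1 ≤ c ∧ c - 1 = (((n - 1).toNat : Int)) := by
    rw [hc]; split_ifs <;> constructor <;> omega
  have hs0 : 0 ≤ s ∧ s ≤ c - 1 := by
    rw [hs]; split_ifs with h1 h2 h3 <;> constructor <;> omega
  have hsz : s < c - 1 → q0 + s * d = 0 := by
    rw [hs]; split_ifs with h1 h2 h3
    · intro _; rw [h2]; ring
    · intro _; omega
    · intro _
      have hdm := PySem.Int.floordiv_mul_add_mod (-q0) d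
      rw [h3.1, add_zero] at hdm
      linarith
    · intro _; omega
  rw [altB f q0 d c s hs0.1 hs0.2 hsz]
  congr 1
  omega
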